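-- pv_equiv track=rewrite | github.com/TopologicalKnotIndexer/group_diagram_combination | group_diagram_combination/main.py | get_all_posible_edges
-- ===== SOURCE A (Python) =====
-- def get_all_posible_node(A:list[int]) -> list:
--     return [
--         [raw_idx + 1, i]
--         for raw_idx, a_i in enumerate(A)
--         for i in range(1, a_i + 1)
--     ]
--
-- def get_all_posible_edges(A:list[int]) -> list:
--     all_node = get_all_posible_node(A)
--     if len(all_node) != sum(A):
--         raise AssertionError()
--     return [
--         [all_node[i], all_node[j]]
--         for i in range(0, len(all_node))
--         for j in range(i + 1, len(all_node))
--         if all_node[i][0] != all_node[j][0]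
--     ]
-- ===== SOURCE B (Python) =====
-- def get_all_posible_edges(A):
--     if any(a < 0 for a in A):
--         raise AssertionError()
--     return [
--         [[g1 + 1, v1], [g2 + 1, v2]]
--         for g1 in range(len(A))
--         for v1 in range(1, A[g1] + 1)
--         for g2 in range(g1 + 1, len(A))
--         for v2 in range(1, A[g2] + 1)
--     ]
-- ===== Notes on version B (the rewrite author's own statement) =====
-- stated objective: alternative
-- what changed: Instead of building the flat node list and scanning all index pairs i<j with a group-inequality filter, B iterates the group structure directly (group g1, value v1, strictly later group g2, value v2) and emits exactly the cross-group pairs in the same order, never generating same-group pairs.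
import Mathlib
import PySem

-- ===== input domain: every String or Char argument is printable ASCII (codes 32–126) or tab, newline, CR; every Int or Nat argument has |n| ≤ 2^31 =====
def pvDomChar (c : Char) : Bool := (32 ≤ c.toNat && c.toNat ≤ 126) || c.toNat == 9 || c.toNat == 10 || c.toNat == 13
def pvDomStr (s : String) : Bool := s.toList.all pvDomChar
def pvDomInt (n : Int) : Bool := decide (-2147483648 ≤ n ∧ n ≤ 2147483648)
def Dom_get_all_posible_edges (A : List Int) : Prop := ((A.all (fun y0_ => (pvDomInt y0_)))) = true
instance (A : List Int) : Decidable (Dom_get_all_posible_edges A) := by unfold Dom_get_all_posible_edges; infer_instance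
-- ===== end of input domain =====

-- B iterates the group structure (g1, v1, later g2, v2) instead of filtering all flat index pairs; alternative decomposition, same output order.


-- ===== PORT A =====
def get_all_posible_node (A : List Int) : List (List Int) :=
  (PySem.List.enumerate A 0).flatMap (fun p =>
    (PySem.List.pyRange 1 (p.2 + 1) 1).map (fun i => [p.1 + 1, i]))

def get_all_posible_edges (A : List Int) : List (List (List Int)) :=
  let all_node := get_all_posible_node A
  if (all_node.length : Int) ≠ A.sum then []  -- Python: raise AssertionError(); excluded by Pre_
  else
    (PySem.List.pyRange 0 (all_node.length : Int) 1).flatMap (fun i =>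
      ((PySem.List.pyRange (i + 1) (all_node.length : Int) 1).filter (fun j =>
          PySem.List.pyGetD (PySem.List.pyGetD all_node i []) 0 0 !=
          PySem.List.pyGetD (PySem.List.pyGetD all_node j []) 0 0)).map (fun j =>
        [PySem.List.pyGetD all_node i [], PySem.List.pyGetD all_node j []]))

-- ===== PORT B =====
def get_all_posible_edges_alt (A : List Int) : List (List (List Int)) :=
  if A.any (fun a => decide (a < 0)) then []  -- Python: raise AssertionError(); excluded by Pre_
  else
    (PySem.List.pyRange 0 (A.length : Int) 1).flatMap (fun g1 =>
      (PySem.List.pyRange 1 (PySem.List.pyGetD A g1 0 + 1) 1).flatMap (fun v1 =>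
        (PySem.List.pyRange (g1 + 1) (A.length : Int) 1).flatMap (fun g2 =>
          (PySem.List.pyRange 1 (PySem.List.pyGetD A g2 0 + 1) 1).map (fun v2 =>
            [[g1 + 1, v1], [g2 + 1, v2]]))))

-- ===== PRECONDITION & SPEC =====
-- Pre_ excludes exactly the inputs with a negative entry, on which the Python A raises AssertionError.
def Pre_get_all_posible_edges (A : List Int) : Prop := ∀ a ∈ A, 0 ≤ a
instance (A : List Int) : Decidable (Pre_get_all_posible_edges A) := by unfold Pre_get_all_posible_edges; infer_instance
def pvWitness_get_all_posible_edges : List Int := [1, 2]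
def Spec_get_all_posible_edges (A : List Int) (out : List (List (List Int))) : Prop := out = get_all_posible_edges_alt A
instance (A : List Int) (out : List (List (List Int))) : Decidable (Spec_get_all_posible_edges A out) := by unfold Spec_get_all_posible_edges; infer_instance

-- ===== CLAIM (what is proved, stated in full; the proofs are below) =====
def Claim_equal_get_all_posible_edges : Prop := ∀ (A : List Int), Dom_get_all_posible_edges A → Pre_get_all_posible_edges A → Spec_get_all_posible_edges A (get_all_posible_edges A)

-- ===== LEMMAS AND PROOFS =====

-- the first component of a node (node[0])
def pvKey (z : List Int) : Int := PySem.List.pyGetD z 0 0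

-- generic indexed recursion over a list: G gets the running index, the element and the tail
def recIdx {α β : Type} (G : Nat → α → List α → List β) : Nat → List α → List β
  | _, [] => []
  | g, x :: t => G g x t ++ recIdx G (g + 1) t

-- the node list of groups L starting at group index g (0-based)
def nodesFrom : Nat → List Nat → List (List Int)
  | _, [] => []
  | g, m :: t => (List.range m).map (fun v : Nat => [(g : Int) + 1, (v : Int) + 1]) ++ nodesFrom (g + 1) t

-- B's grouped pair enumeration starting at group index g
def groupedFrom : Nat → List Nat → List (List (List Int))
  | _, [] => []
  | g, m :: t =>
      (List.range m).flatMap (fun v : Nat =>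
        (nodesFrom (g + 1) t).map (fun y => [[(g : Int) + 1, (v : Int) + 1], y])) ++
      groupedFrom (g + 1) t

-- one node paired with every later node of a different key
def pairStep (x : List Int) (t : List (List Int)) : List (List (List Int)) :=
  (t.filter (fun y => pvKey x != pvKey y)).map (fun y => [x, y])

-- A's pair enumeration, recursively
def pairsRec : List (List Int) → List (List (List Int))
  | [] => []
  | x :: t => pairStep x t ++ pairsRec t

-- B's outer loop body: group g of size m, later groups t
def pvGB (g : Nat) (m : Nat) (t : List Nat) : List (List (List Int)) :=
  (List.range m).flatMap (fun v1 : Nat =>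
    recIdx (fun g2 m2 _ => (List.range m2).map
        (fun v2 : Nat => [[(g : Int) + 1, (v1 : Int) + 1], [(g2 : Int) + 1, (v2 : Int) + 1]]))
      (g + 1) t)

theorem pvKey_pair (a b : Int) : pvKey [a, b] = a := rfl

theorem pyRange_castcast (a b : Nat) :
    PySem.List.pyRange (a : Int) (b : Int) 1 = ((List.range b).drop a).map (fun m : Nat => (m : Int)) := by
  induction b with
  | zero =>
    have h : PySem.List.pyRange (a : Int) ((0:Nat) : Int) 1 = [] := by
      rw [List.eq_nil_iff_forall_not_mem]
      intro x hx
      have := PySem.List.mem_pyRange_one.mp hx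
      omega
    exact h.trans (by simp)
  | succ n ih =>
    by_cases hab : a ≤ n
    · have h : ((n+1 : Nat) : Int) = (n : Int) + 1 := by push_cast; ring
      rw [h, PySem.List.pyRange_one_succ_right (by exact_mod_cast hab), ih,
          List.range_succ, List.drop_append_of_le_length (by simpa using hab), List.map_append]
      rfl
    · have h1 : PySem.List.pyRange (a : Int) ((n+1 : Nat) : Int) 1 = [] := by
        rw [List.eq_nil_iff_forall_not_mem]
        intro x hx
        have := PySem.List.mem_pyRange_one.mp hx
        have h3 : (x : Int) < ((n+1:Nat) : Int) := this.2
        have h2 := (PySem.List.mem_pyRange_one.mp hx).1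
        push_cast at h3
        omega
      have h2 : (List.range (n+1)).drop a = [] :=
        List.drop_eq_nil_of_le (by simpa using by omega)
      rw [h1, h2]; rfl

theorem pyRange_one_succ (m : Nat) :
    PySem.List.pyRange 1 ((m : Int) + 1) 1 = (List.range m).map (fun v : Nat => (v : Int) + 1) := by
  have h2 : ((m : Int) + 1) = ((m + 1 : Nat) : Int) := by push_cast; ring
  rw [h2]
  show PySem.List.pyRange ((1 : Nat) : Int) (((m + 1 : Nat)) : Int) 1 = _
  rw [pyRange_castcast, List.range_succ_eq_map, List.drop_one, List.tail_cons, List.map_map]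
  apply List.map_congr_left
  intro v _
  simp [Nat.succ_eq_add_one]

theorem pyRange_succ_cast (j b : Nat) :
    PySem.List.pyRange ((j : Int) + 1) (b : Int) 1
      = ((List.range b).drop (j + 1)).map (fun m : Nat => (m : Int)) := by
  have h : ((j : Int) + 1) = ((j + 1 : Nat) : Int) := by push_cast; ring
  rw [h, pyRange_castcast]

theorem getD_drop' {α : Type} (l : List α) (k j : Nat) (d : α) :
    (l.drop k).getD j d = l.getD (k + j) d := by
  rw [List.getD_eq_getElem?_getD, List.getD_eq_getElem?_getD, List.getElem?_drop]

theorem map_getD_drop {α : Type} (ns : List α) (d : α) (k : Nat) :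
    ((List.range ns.length).drop k).map (fun j => ns.getD j d) = ns.drop k := by
  apply List.ext_getElem
  · simp
  · intro i h1 h2
    simp only [List.getElem_map, List.getElem_drop, List.getElem_range]
    rw [List.getD_eq_getElem ns d (by simp at h2 ⊢; omega)]

theorem filter_map_getD {α β : Type} (ns : List α) (d : α) (k : Nat) (p : α → Bool) (q : α → β) :
    (((List.range ns.length).drop k).filter (fun j => p (ns.getD j d))).map (fun j => q (ns.getD j d))
      = ((ns.drop k).filter p).map q := by
  conv_rhs => rw [← map_getD_drop ns d k]
  rw [List.filter_map, List.map_map]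
  rfl

theorem L3full {α β : Type} (d : α) (G : Nat → α → List α → List β) :
    ∀ (t : List α) (s : Nat) (F : Nat → List β),
      (∀ j, F j = G (s + j) (t.getD j d) (t.drop (j + 1))) →
      (List.range t.length).flatMap F = recIdx G s t := by
  intro t
  induction t with
  | nil => intro s F _; rfl
  | cons x t ih =>
    intro s F hF
    rw [List.length_cons, List.range_succ_eq_map, List.flatMap_cons, List.flatMap_map]
    have h0 : F 0 = G s x t := by rw [hF 0]; rfl
    rw [h0, recIdx]
    congr 1
    apply ih (s + 1)
    intro j
    have := hF (j + 1)
    simpa [Nat.add_assoc, Nat.add_comm 1 j] using this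

theorem L3d {α β : Type} (d : α) (G : Nat → α → List α → List β) (ns : List α) (k : Nat) :
    ((List.range ns.length).drop k).flatMap
        (fun j => G j (ns.getD j d) (ns.drop (j + 1))) = recIdx G k (ns.drop k) := by
  rw [List.range_eq_range', List.drop_range', Nat.zero_add, Nat.mul_one,
      List.range'_eq_map_range, List.flatMap_map]
  rw [← List.length_drop]
  apply L3full d G (ns.drop k) k
  intro j
  have hd : List.drop (j+1) (List.drop k ns) = List.drop (k+j+1) ns := by
    rw [List.drop_drop]; congr 1
  rw [getD_drop', hd]

theorem recIdx_pairs : ∀ (ns : List (List Int)) (g : Nat),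
    recIdx (fun _ x t => pairStep x t) g ns = pairsRec ns := by
  intro ns
  induction ns with
  | nil => intro g; rfl
  | cons x t ih => intro g; simp [recIdx, pairsRec, ih]

theorem A_pairs (ns : List (List Int)) :
    (PySem.List.pyRange 0 (ns.length : Int) 1).flatMap (fun i =>
      ((PySem.List.pyRange (i + 1) (ns.length : Int) 1).filter (fun j =>
          PySem.List.pyGetD (PySem.List.pyGetD ns i []) 0 0 !=
          PySem.List.pyGetD (PySem.List.pyGetD ns j []) 0 0)).map (fun j =>
        [PySem.List.pyGetD ns i [], PySem.List.pyGetD ns j []])) = pairsRec ns := by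
  rw [PySem.List.pyRange_zero_natCast, List.flatMap_map]
  rw [L3full ([] : List Int) (fun _ x t => pairStep x t) ns 0 _ ?hF, recIdx_pairs]
  case hF =>
    intro j
    have h1 : ((j : Int) + 1) = ((j + 1 : Nat) : Int) := by push_cast; ring
    simp only [h1, pyRange_castcast (j+1) ns.length, List.filter_map, List.map_map,
      Function.comp_def, PySem.List.pyGetD_natCast]
    simp only [pairStep]
    exact filter_map_getD ns [] (j+1)
      (fun y => pvKey (ns.getD j []) != pvKey y) (fun y => [ns.getD j [], y])

theorem nodes_eq' : ∀ (L : List Nat) (s : Nat),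
    (PySem.List.enumerate (L.map (fun m : Nat => (m : Int))) (s : Int)).flatMap (fun p =>
      (PySem.List.pyRange 1 (p.2 + 1) 1).map (fun i => [p.1 + 1, i])) = nodesFrom s L := by
  intro L
  induction L with
  | nil => intro s; rfl
  | cons m t ih =>
    intro s
    rw [List.map_cons, PySem.List.enumerate_cons, List.flatMap_cons]
    simp only [nodesFrom]
    congr 1
    · rw [pyRange_one_succ, List.map_map]
      rfl
    · have h3 : ((s : Int) + 1) = ((s + 1 : Nat) : Int) := by push_cast; ring
      rw [h3]
      exact ih (s + 1)

theorem nodes_eq (L : List Nat) :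
    get_all_posible_node (L.map (fun m : Nat => (m : Int))) = nodesFrom 0 L := by
  have := nodes_eq' L 0
  simpa [get_all_posible_node] using this

theorem len_nodesFrom : ∀ (L : List Nat) (g : Nat), (nodesFrom g L).length = L.sum := by
  intro L
  induction L with
  | nil => intro g; rfl
  | cons m t ih => intro g; simp [nodesFrom, ih]

theorem key_nodesFrom : ∀ (L : List Nat) (g : Nat) (y : List Int),
    y ∈ nodesFrom g L → (g : Int) + 1 ≤ pvKey y := by
  intro L
  induction L with
  | nil => intro g y hy; simp [nodesFrom] at hy
  | cons m t ih =>
    intro g y hy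
    simp only [nodesFrom, List.mem_append] at hy
    rcases hy with hy | hy
    · obtain ⟨v, _, rfl⟩ := List.mem_map.mp hy
      rw [pvKey_pair]
    · have := ih (g + 1) y hy
      push_cast at this
      omega

theorem pairsRec_append : ∀ (B R : List (List Int)) (c : Int),
    (∀ x ∈ B, pvKey x = c) → (∀ y ∈ R, pvKey y ≠ c) →
    pairsRec (B ++ R) = B.flatMap (fun x => R.map (fun y => [x, y])) ++ pairsRec R := by
  intro B
  induction B with
  | nil => intro R c _ _; simp
  | cons x B' ih =>
    intro R c hB hR
    have hx : pvKey x = c := hB x (by simp)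
    simp only [List.cons_append, pairsRec, pairStep, List.filter_append]
    have h1 : (B'.filter (fun y => pvKey x != pvKey y)) = [] := by
      rw [List.filter_eq_nil_iff]
      intro a ha
      simp [hx, hB a (by simp [ha])]
    have h2 : (R.filter (fun y => pvKey x != pvKey y)) = R := by
      rw [List.filter_eq_self]
      intro a ha
      simp only [bne_iff_ne, ne_eq, hx]
      exact fun h => (hR a ha) h.symm
    rw [h1, h2, List.nil_append, List.flatMap_cons,
        ih R c (fun b hb => hB b (by simp [hb])) hR, List.append_assoc]

theorem A3 : ∀ (L : List Nat) (g : Nat), pairsRec (nodesFrom g L) = groupedFrom g L := by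
  intro L
  induction L with
  | nil => intro g; rfl
  | cons m t ih =>
    intro g
    simp only [nodesFrom, groupedFrom]
    rw [pairsRec_append _ _ ((g : Int) + 1)
        (by intro x hx; obtain ⟨v, _, rfl⟩ := List.mem_map.mp hx; rfl)
        (by intro y hy
            have := key_nodesFrom t (g + 1) y hy
            push_cast at this
            omega),
      List.flatMap_map, ih (g + 1)]

theorem mapNodes : ∀ (t : List Nat) (s : Nat) (x : List Int),
    recIdx (fun g2 m2 _ => (List.range m2).map
        (fun v2 : Nat => [x, [(g2 : Int) + 1, (v2 : Int) + 1]])) s t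
      = (nodesFrom s t).map (fun y => [x, y]) := by
  intro t
  induction t with
  | nil => intro s x; rfl
  | cons m t ih =>
    intro s x
    simp only [recIdx, nodesFrom, List.map_append, List.map_map, ih]
    rfl

theorem recIdx_GB : ∀ (L : List Nat) (g : Nat), recIdx pvGB g L = groupedFrom g L := by
  intro L
  induction L with
  | nil => intro g; rfl
  | cons m t ih =>
    intro g
    simp only [recIdx, pvGB, groupedFrom, mapNodes, ih]

theorem a_eq (L : List Nat) :
    get_all_posible_edges (L.map (fun m : Nat => (m : Int))) = groupedFrom 0 L := by
  simp only [get_all_posible_edges]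
  rw [nodes_eq]
  have hlen : ((nodesFrom 0 L).length : Int) = (L.map (fun m : Nat => (m : Int))).sum := by
    rw [len_nodesFrom]
    exact Nat.cast_list_sum L
  rw [if_neg (by simp [hlen])]
  rw [A_pairs (nodesFrom 0 L), A3]

theorem alt_eq (L : List Nat) :
    get_all_posible_edges_alt (L.map (fun m : Nat => (m : Int))) = groupedFrom 0 L := by
  have hg : ∀ (i : Int), PySem.List.pyGetD (L.map (fun m : Nat => (m : Int))) i 0
      = ((PySem.List.pyGetD L i 0 : Nat) : Int) :=
    fun i => PySem.List.pyGetD_map (fun m : Nat => (m : Int)) L i 0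
  simp only [get_all_posible_edges_alt]
  rw [if_neg (by simp)]
  rw [List.length_map, PySem.List.pyRange_zero_natCast, List.flatMap_map]
  rw [L3full (0 : Nat) pvGB L 0 _ ?hF, recIdx_GB]
  case hF =>
    intro j
    simp only [hg, PySem.List.pyGetD_natCast]
    rw [pyRange_one_succ (L.getD j 0), List.flatMap_map]
    simp only [pyRange_succ_cast, List.flatMap_map]
    simp only [PySem.List.pyGetD_natCast]
    simp only [pyRange_one_succ, List.map_map]
    have hL3 : ∀ (v : Nat),
        ((List.range L.length).drop (j + 1)).flatMap (fun g2 =>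
          (List.range (L.getD g2 0)).map ((fun v2 : Int => [[(j:Int) + 1, (v:Int) + 1], [(g2:Int) + 1, v2]]) ∘ (fun v2 : Nat => (v2 : Int) + 1)))
        = recIdx (fun g2 m2 _ => (List.range m2).map
            (fun v2 : Nat => [[(j : Int) + 1, (v : Int) + 1], [(g2 : Int) + 1, (v2 : Int) + 1]]))
            (j + 1) (L.drop (j + 1)) := by
      intro v
      exact L3d 0 (fun g2 m2 _ => (List.range m2).map
        (fun v2 : Nat => [[(j : Int) + 1, (v : Int) + 1], [(g2 : Int) + 1, (v2 : Int) + 1]])) L (j + 1)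
    simp only [hL3]
    simp only [pvGB, Nat.zero_add]

-- ===== VERDICT (by name: the statement is the Claim_ definition above) =====
theorem get_all_posible_edges_spec : Claim_equal_get_all_posible_edges := by
  intro A _ hPre
  have hA : (A.map Int.toNat).map (fun m : Nat => (m : Int)) = A := by
    rw [List.map_map]
    calc A.map ((fun m : Nat => (m : Int)) ∘ Int.toNat)
        = A.map id := List.map_congr_left (fun a ha => Int.toNat_of_nonneg (hPre a ha))
      _ = A := List.map_id A
  unfold Spec_get_all_posible_edges
  rw [← hA, a_eq, alt_eq]
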